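-- pv_equiv track=rewrite | github.com/mitchedberg/Family_Image_Archive | photo_archive/archive_lib/variant_selector.py | select_variant
-- ===== SOURCE A (Python) =====
-- from enum import Enum
-- from typing import Dict, List, Optional
--
-- class VariantRole(Enum):
--     """Standard variant roles."""
--     AI = 'ai_front_v1'
--     PROXY = 'proxy_front'
--     RAW = 'raw_front'
--     ORIGINAL = 'original'
--
-- def select_variant(
--     variants: List[Dict],
--     prefer_ai: bool = True,
--     preferred_role: Optional[str] = None
-- ) -> Optional[Dict]:
--     """Select best variant from available variants.
--
--     Args:
--         variants: List of variant dicts with 'role' key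
--         prefer_ai: If True, prefer AI over ORIGINAL/PROXY/RAW
--         preferred_role: Override to force specific role
--
--     Returns:
--         Selected variant dict, or None if no suitable variant
--
--     Selection logic:
--         1. If preferred_role specified, use that (if available)
--         2. Else if prefer_ai: AI → PROXY → RAW
--         3. Else: PROXY → RAW → AI (fallback)
--
--     Examples:
--         >>> variants = [
--         ...     {'role': 'raw_front', 'path': '/raw.jpg'},
--         ...     {'role': 'ai_front_v1', 'path': '/ai.jpg'},
--         ... ]
--         >>> result = select_variant(variants, prefer_ai=True)
--         >>> result['role']
--         'ai_front_v1'
--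
--         >>> result = select_variant(variants, prefer_ai=False)
--         >>> result['role']
--         'raw_front'
--
--         >>> result = select_variant(variants, preferred_role='raw_front')
--         >>> result['role']
--         'raw_front'
--     """
--     if not variants:
--         return None
--
--     # Build role → variant mapping, preferring primary variants
--     role_map: Dict[str, Dict] = {}
--     for variant in variants:
--         role = variant.get("role")
--         if not role:
--             continue
--         # Prefer primary variants if multiple with same role exist
--         if role not in role_map or variant.get("is_primary"):
--             role_map[role] = variant
--
--     # Handle explicit preferred role override
--     if preferred_role and preferred_role in role_map:
--         return role_map[preferred_role]
--
--     # Define selection order based on preference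
--     if prefer_ai:
--         order = [VariantRole.AI.value, VariantRole.PROXY.value, VariantRole.RAW.value]
--     else:
--         # When not preferring AI, check originals first, then AI as fallback
--         order = [VariantRole.PROXY.value, VariantRole.RAW.value, VariantRole.AI.value]
--
--     # Try roles in order
--     for role in order:
--         variant = role_map.get(role)
--         if variant:
--             return variant
--
--     # No preferred variants found, return None
--     return None
-- ===== SOURCE B (Python) =====
-- def select_variant(variants, prefer_ai=True, preferred_role=None):
--     """Pick first variant for the highest-priority role present,
--     letting the last primary variant of that role win."""
--     order = (['ai_front_v1', 'proxy_front', 'raw_front'] if prefer_ai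
--              else ['proxy_front', 'raw_front', 'ai_front_v1'])
--     candidates = ([preferred_role] if preferred_role else []) + order
--     for role in candidates:
--         chosen = None
--         for v in variants:
--             if v.get('role') == role:
--                 if chosen is None or v.get('is_primary'):
--                     chosen = v
--         if chosen is not None:
--             return chosen
--     return None
-- ===== Notes on version B (the rewrite author's own statement) =====
-- stated objective: simpler
-- what changed: B drops A's role->variant dict entirely: it forms the priority-ordered candidate role list (preferred role first, then the AI/PROXY/RAW order) and for each candidate scans the variants once, keeping the first occurrence unless a later primary variant overrides it.
import Mathlib
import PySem

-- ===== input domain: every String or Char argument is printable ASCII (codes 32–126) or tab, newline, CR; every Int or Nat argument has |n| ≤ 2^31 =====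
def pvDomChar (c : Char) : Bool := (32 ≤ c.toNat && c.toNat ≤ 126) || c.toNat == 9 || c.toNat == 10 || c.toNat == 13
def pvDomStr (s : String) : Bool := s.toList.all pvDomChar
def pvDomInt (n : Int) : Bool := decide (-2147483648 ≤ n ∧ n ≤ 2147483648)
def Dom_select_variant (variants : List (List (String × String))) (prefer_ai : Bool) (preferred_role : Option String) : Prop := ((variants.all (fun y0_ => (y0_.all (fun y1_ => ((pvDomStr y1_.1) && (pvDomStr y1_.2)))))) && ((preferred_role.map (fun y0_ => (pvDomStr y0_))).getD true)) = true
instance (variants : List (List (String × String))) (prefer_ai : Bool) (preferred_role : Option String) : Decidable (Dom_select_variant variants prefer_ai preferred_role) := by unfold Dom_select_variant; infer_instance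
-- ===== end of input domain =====

-- B replaces A's role→variant map build + lookups by priority-ordered scans of the
-- variant list (objective: simpler, no intermediate dict); return-value equivalence proved.

-- ===== PORT A =====
-- loop body of A's role-map build: skip falsy roles, prefer (last) primary variants
def svStepA (m : PySem.Dict String (List (String × String))) (v : List (String × String)) :
    PySem.Dict String (List (String × String)) :=
  let role := PySem.Dict.getD (PySem.Dict.mk v) "role" ""
  if role = "" then m
  else if (PySem.Dict.get? m role) = none ∨ PySem.Dict.getD (PySem.Dict.mk v) "is_primary" "" ≠ "" then
    PySem.Dict.insert m role v
  else m

def svBuildMap (variants : List (List (String × String))) :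
    PySem.Dict String (List (String × String)) :=
  variants.foldl svStepA PySem.Dict.empty

-- 'for role in order: variant = role_map.get(role); if variant: return variant'
def svTryOrder (order : List String) (m : PySem.Dict String (List (String × String))) :
    Option (List (String × String)) :=
  match order with
  | [] => none
  | r :: rs =>
    match PySem.Dict.get? m r with
    | some v => if v ≠ [] then some v else svTryOrder rs m
    | none => svTryOrder rs m

def select_variant (variants : List (List (String × String))) (prefer_ai : Bool) (preferred_role : Option String) : Option (List (String × String)) :=
  if variants = [] then none
  else
    let role_map := svBuildMap variants
    let pref := preferred_role.getD ""
    if pref ≠ "" ∧ (PySem.Dict.get? role_map pref).isSome then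
      PySem.Dict.get? role_map pref
    else
      let order := if prefer_ai then ["ai_front_v1", "proxy_front", "raw_front"]
                   else ["proxy_front", "raw_front", "ai_front_v1"]
      svTryOrder order role_map

-- ===== PORT B =====
-- scan variants for `role`: first occurrence unless a later primary wins
def svStepB (role : String) (chosen : Option (List (String × String))) (v : List (String × String)) :
    Option (List (String × String)) :=
  if PySem.Dict.get? (PySem.Dict.mk v) "role" = some role then
    match chosen with
    | none => some v
    | some _ => if PySem.Dict.getD (PySem.Dict.mk v) "is_primary" "" ≠ "" then some v else chosen
  else chosen

def svPickRole (variants : List (List (String × String))) (role : String) :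
    Option (List (String × String)) :=
  variants.foldl (svStepB role) none

def svFirstPick (variants : List (List (String × String))) (candidates : List String) :
    Option (List (String × String)) :=
  match candidates with
  | [] => none
  | r :: rs =>
    match svPickRole variants r with
    | some v => some v
    | none => svFirstPick variants rs

def select_variant_alt (variants : List (List (String × String))) (prefer_ai : Bool) (preferred_role : Option String) : Option (List (String × String)) :=
  let order := if prefer_ai then ["ai_front_v1", "proxy_front", "raw_front"]
               else ["proxy_front", "raw_front", "ai_front_v1"]
  let candidates :=
    (match preferred_role with
     | some p => if p ≠ "" then [p] else []
     | none => []) ++ order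
  svFirstPick variants candidates

-- ===== PRECONDITION & SPEC =====
def Spec_select_variant (variants : List (List (String × String))) (prefer_ai : Bool) (preferred_role : Option String) (out : Option (List (String × String))) : Prop := out = select_variant_alt variants prefer_ai preferred_role
instance (variants : List (List (String × String))) (prefer_ai : Bool) (preferred_role : Option String) (out : Option (List (String × String))) : Decidable (Spec_select_variant variants prefer_ai preferred_role out) := by unfold Spec_select_variant; infer_instance

-- ===== CLAIM (what is proved, stated in full; the proofs are below) =====
def Claim_equal_select_variant : Prop := ∀ (variants : List (List (String × String))) (prefer_ai : Bool) (preferred_role : Option String), Dom_select_variant variants prefer_ai preferred_role → Spec_select_variant variants prefer_ai preferred_role (select_variant variants prefer_ai preferred_role)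

-- ===== LEMMAS AND PROOFS =====

-- one step of A's map build, observed at key r, is one step of B's single-role scan
theorem sv_step_eq (m : PySem.Dict String (List (String × String))) (v : List (String × String))
    (r : String) (hr : r ≠ "") :
    PySem.Dict.get? (svStepA m v) r = svStepB r (PySem.Dict.get? m r) v := by
  unfold svStepA svStepB
  rcases hrole : PySem.Dict.get? (PySem.Dict.mk v) "role" with _ | s
  · simp [PySem.Dict.getD_eq_get?_getD, hrole, hr]
  · by_cases hsr : s = r
    · subst hsr
      simp only [PySem.Dict.getD_eq_get?_getD, hrole, Option.getD_some, if_neg hr, hrole]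
      rcases hm : PySem.Dict.get? m s with _ | w
      · simp [hm, PySem.Dict.get?_insert]
      · by_cases hp : (PySem.Dict.get? (PySem.Dict.mk v) "is_primary").getD "" = ""
        · simp [hm, hp]
        · simp [hm, hp, PySem.Dict.get?_insert]
    · have hB : ¬ (some s = some r) := fun h => hsr (Option.some.inj h)
      simp only [PySem.Dict.getD_eq_get?_getD, hrole, Option.getD_some, if_neg hB]
      split_ifs with h1 h2 <;>
        simp [PySem.Dict.get?_insert, Ne.symm hsr]

-- fold form of the previous lemma
theorem sv_fold (r : String) (hr : r ≠ "") (vs : List (List (String × String))) :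
    ∀ m, PySem.Dict.get? (vs.foldl svStepA m) r = vs.foldl (svStepB r) (PySem.Dict.get? m r) := by
  induction vs with
  | nil => intro m; rfl
  | cons v vs ih =>
    intro m
    simp only [List.foldl_cons]
    rw [ih, sv_step_eq m v r hr]

-- lookup in A's fold-built map equals B's single-role scan, for a truthy role
theorem sv_get_buildMap (variants : List (List (String × String))) (r : String) (hr : r ≠ "") :
    PySem.Dict.get? (svBuildMap variants) r = svPickRole variants r := by
  unfold svBuildMap svPickRole
  rw [sv_fold r hr variants PySem.Dict.empty, PySem.Dict.get?_empty]

-- B's scan only picks nonempty dicts (loop invariant)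
theorem sv_pick_inv (r : String) (vs : List (List (String × String))) :
    ∀ chosen, (∀ v, chosen = some v → v ≠ []) →
      ∀ v, vs.foldl (svStepB r) chosen = some v → v ≠ [] := by
  induction vs with
  | nil => intro chosen h v hv; exact h v hv
  | cons u vs ih =>
    intro chosen h v hv
    refine ih (svStepB r chosen u) ?_ v hv
    intro v' h'
    unfold svStepB at h'
    by_cases hc : PySem.Dict.get? (PySem.Dict.mk u) "role" = some r
    · have hu : u ≠ [] := by
        intro he; subst he
        rw [show PySem.Dict.mk ([] : List (String × String)) = PySem.Dict.empty from rfl,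
          PySem.Dict.get?_empty] at hc
        exact absurd hc (by simp)
      rw [if_pos hc] at h'
      rcases chosen with _ | w
      · cases h'; exact hu
      · split_ifs at h'
        · cases h'; exact hu
        · exact h v' h'
    · rw [if_neg hc] at h'
      exact h v' h'

-- B's scan only ever picks a variant whose dict is nonempty (it has a 'role' entry)
theorem sv_pick_ne_nil (variants : List (List (String × String))) (r : String)
    (v : List (String × String)) (h : svPickRole variants r = some v) : v ≠ [] := by
  refine sv_pick_inv r variants none ?_ v h
  intro v' hv'
  exact absurd hv' (by simp)

theorem sv_firstPick_nil (cs : List String) : svFirstPick [] cs = none := by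
  induction cs with
  | nil => rfl
  | cons r rs ih => simp [svFirstPick, svPickRole, ih]

-- A's ordered map lookups = B's ordered scans, for truthy roles
theorem sv_try_eq_first (variants : List (List (String × String))) (order : List String)
    (h : ∀ r ∈ order, r ≠ "") :
    svTryOrder order (svBuildMap variants) = svFirstPick variants order := by
  induction order with
  | nil => rfl
  | cons r rs ih =>
    have hr : r ≠ "" := h r (List.mem_cons_self ..)
    unfold svTryOrder svFirstPick
    rw [sv_get_buildMap variants r hr]
    rcases hp : svPickRole variants r with _ | v
    · exact ih (fun r' hr' => h r' (List.mem_cons_of_mem _ hr'))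
    · simp [sv_pick_ne_nil variants r v hp]

theorem svFirstPick_cons (vs : List (List (String × String))) (r : String) (rs : List String) :
    svFirstPick vs (r :: rs) =
      match svPickRole vs r with
      | some v => some v
      | none => svFirstPick vs rs := rfl

theorem sv_order_ne (prefer_ai : Bool) :
    ∀ r ∈ (if prefer_ai then ["ai_front_v1", "proxy_front", "raw_front"]
           else ["proxy_front", "raw_front", "ai_front_v1"]), r ≠ "" := by
  cases prefer_ai <;> decide

-- ===== VERDICT (by name: the statement is the Claim_ definition above) =====
theorem select_variant_spec : Claim_equal_select_variant := by
  unfold Claim_equal_select_variant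
  intro variants prefer_ai preferred_role _
  unfold Spec_select_variant select_variant select_variant_alt
  by_cases hvs : variants = []
  · subst hvs
    simp only [if_pos rfl]
    exact (sv_firstPick_nil _).symm
  · rw [if_neg hvs]
    simp only []
    rcases preferred_role with _ | p
    · simp only [Option.getD_none, List.nil_append]
      rw [if_neg (by simp)]
      exact sv_try_eq_first variants _ (sv_order_ne prefer_ai)
    · simp only [Option.getD_some]
      by_cases hp : p = ""
      · subst hp
        rw [if_neg (by simp)]
        simp only [if_neg (by simp : ¬("" : String) ≠ ""), List.nil_append]
        exact sv_try_eq_first variants _ (sv_order_ne prefer_ai)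
      · simp only [if_pos hp, List.cons_append, List.nil_append]
        have hpick := (sv_get_buildMap variants p hp).symm
        rcases hm : PySem.Dict.get? (svBuildMap variants) p with _ | w
        · rw [if_neg (by simp [hm])]
          rw [svFirstPick_cons, hpick.trans hm]
          exact sv_try_eq_first variants _ (sv_order_ne prefer_ai)
        · rw [if_pos ⟨hp, by simp⟩, svFirstPick_cons]
          have h0 : svPickRole variants p = some w := hpick.trans hm
          simp [h0]
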